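-- pv_equiv track=rewrite | github.com/vlarjun20/-Digital-Character-Recognition- | test1.py | group_by_lines
-- ===== SOURCE A (Python) =====
-- def group_by_lines(detections, y_threshold=15):
--     lines = []
--     current_line = []
--     prev_y_min = detections[0][1]  # Set the first y_min as reference
--
--     for det in detections:
--         x_min, y_min, x_max, y_max, label = det
--         if abs(y_min - prev_y_min) > y_threshold:
--             # New line starts
--             lines.append(current_line)
--             current_line = [det]  # Start a new line
--         else:
--             # Same line
--             current_line.append(det)
--
--         prev_y_min = y_min
--
--     # Add the last line
--     if current_line:
--         lines.append(current_line)
--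
--     return lines
-- ===== SOURCE B (Python) =====
-- def group_by_lines(detections, y_threshold=15):
--     # Previous y_min of each element (the first element is its own reference).
--     prevs = [detections[0][1]] + [d[1] for d in detections[:-1]]
--     # Build the grouping back-to-front: an element whose |y - prev_y| exceeds
--     # the threshold STARTS a line, so in the reversed pass it closes the group.
--     rev_groups = []
--     cur = []
--     for det, p in reversed(list(zip(detections, prevs))):
--         cur.append(det)
--         if abs(det[1] - p) > y_threshold:
--             rev_groups.append(cur[::-1])
--             cur = []
--     rev_groups.append(cur[::-1])
--     return rev_groups[::-1]
-- ===== Notes on version B (the rewrite author's own statement) =====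
-- stated objective: alternative
-- what changed: B precomputes each element's previous y_min once, then builds the grouping back-to-front in a single reversed pass that closes a group exactly at the elements that start a new line, instead of A's forward loop threading lines/current_line/prev accumulators with a trailing non-empty check.
import Mathlib
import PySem

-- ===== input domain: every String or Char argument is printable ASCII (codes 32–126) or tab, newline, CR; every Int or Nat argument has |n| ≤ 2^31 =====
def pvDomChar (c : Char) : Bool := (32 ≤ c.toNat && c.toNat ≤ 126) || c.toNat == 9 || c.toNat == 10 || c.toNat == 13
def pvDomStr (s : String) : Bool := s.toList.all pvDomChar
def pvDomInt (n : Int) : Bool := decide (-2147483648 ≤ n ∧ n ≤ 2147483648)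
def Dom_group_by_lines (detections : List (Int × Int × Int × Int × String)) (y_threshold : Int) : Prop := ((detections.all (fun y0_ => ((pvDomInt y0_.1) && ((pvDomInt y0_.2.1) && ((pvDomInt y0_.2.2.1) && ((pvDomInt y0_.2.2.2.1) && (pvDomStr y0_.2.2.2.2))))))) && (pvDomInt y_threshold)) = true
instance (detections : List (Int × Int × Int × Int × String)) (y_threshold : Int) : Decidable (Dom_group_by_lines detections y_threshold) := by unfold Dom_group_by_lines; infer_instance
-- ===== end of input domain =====

-- B builds the same grouping back-to-front in one reversed pass (different decomposition);
-- equivalence is proved on Pre_ = non-empty input, where Python A returns (it raises IndexError on []).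

abbrev PvDet : Type := Int × Int × Int × Int × String

-- ===== PORT A =====
-- A's loop body: thread (lines, current_line, prev_y_min) through the detections.
def pvStepA (y_threshold : Int) (s : List (List PvDet) × List PvDet × Int) (det : PvDet) :
    List (List PvDet) × List PvDet × Int :=
  if |det.2.1 - s.2.2| > y_threshold then
    (s.1 ++ [s.2.1], [det], det.2.1)
  else
    (s.1, s.2.1 ++ [det], det.2.1)

def group_by_lines (detections : List PvDet) (y_threshold : Int) : List (List PvDet) :=
  -- prev_y_min = detections[0][1]: pyGet? is none (IndexError) on []; that input is excluded by Pre_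
  let prev0 : Int := ((PySem.List.pyGet? detections 0).getD (0, 0, 0, 0, "")).2.1
  let r := detections.foldl (pvStepA y_threshold) ([], [], prev0)
  if r.2.1 = [] then r.1 else r.1 ++ [r.2.1]

-- ===== PORT B =====
-- B's loop body over (det, prev_y) pairs taken in reversed order: append to cur,
-- and when det starts a line, close the group (reversed back to forward order).
def pvStepB (y_threshold : Int) (s : List (List PvDet) × List PvDet) (dp : PvDet × Int) :
    List (List PvDet) × List PvDet :=
  let cur2 := s.2 ++ [dp.1]
  if |dp.1.2.1 - dp.2| > y_threshold then (s.1 ++ [cur2.reverse], []) else (s.1, cur2)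

def group_by_lines_alt (detections : List PvDet) (y_threshold : Int) : List (List PvDet) :=
  match detections with
  | [] => []   -- Python raises IndexError at detections[0]; excluded by Pre_
  | d0 :: _ =>
    let prevs : List Int := d0.2.1 :: detections.dropLast.map (fun d => d.2.1)
    let p := (detections.zip prevs).reverse.foldl (pvStepB y_threshold) ([], [])
    (p.1 ++ [p.2.reverse]).reverse

-- ===== PRECONDITION & SPEC =====
-- Pre_ excludes only the empty list, on which Python A (and B) raise IndexError.
def Pre_group_by_lines (detections : List PvDet) (y_threshold : Int) : Prop :=
  detections ≠ []
instance (detections : List PvDet) (y_threshold : Int) : Decidable (Pre_group_by_lines detections y_threshold) := by unfold Pre_group_by_lines; infer_instance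

def pvWitness_group_by_lines : (List PvDet) × Int := ([(0, 0, 10, 10, "a"), (1, 40, 11, 50, "b")], 15)

def Spec_group_by_lines (detections : List PvDet) (y_threshold : Int) (out : List (List PvDet)) : Prop := out = group_by_lines_alt detections y_threshold
instance (detections : List PvDet) (y_threshold : Int) (out : List (List PvDet)) : Decidable (Spec_group_by_lines detections y_threshold out) := by unfold Spec_group_by_lines; infer_instance

-- ===== CLAIM (what is proved, stated in full; the proofs are below) =====
def Claim_equal_group_by_lines : Prop := ∀ (detections : List (Int × Int × Int × Int × String)) (y_threshold : Int), Dom_group_by_lines detections y_threshold → Pre_group_by_lines detections y_threshold → Spec_group_by_lines detections y_threshold (group_by_lines detections y_threshold)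

-- ===== LEMMAS AND PROOFS =====

-- The common specification both loops compute: goLines thr items prev = (head group, later groups),
-- where an element starts a new group when |y - prev| > thr.
def goLines (thr : Int) : List PvDet → Int → List PvDet × List (List PvDet)
  | [], _ => ([], [])
  | d :: rest, prev =>
    let g := goLines thr rest d.2.1
    if |d.2.1 - prev| > thr then ([], (d :: g.1) :: g.2) else (d :: g.1, g.2)

lemma pvAfold (thr : Int) (items : List PvDet) :
    ∀ (d : PvDet) (lines : List (List PvDet)) (cur : List PvDet) (prev : Int),
    (let r := List.foldl (pvStepA thr) (lines, cur, prev) (d :: items)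
     if r.2.1 = [] then r.1 else r.1 ++ [r.2.1])
    = lines ++ (cur ++ (goLines thr (d :: items) prev).1) :: (goLines thr (d :: items) prev).2 := by
  induction items with
  | nil =>
    intro d lines cur prev
    simp only [List.foldl, goLines, pvStepA]
    by_cases h : |d.2.1 - prev| > thr <;> simp [h]
  | cons d2 items ih =>
    intro d lines cur prev
    simp only [List.foldl_cons]
    have := ih d2 ((pvStepA thr (lines, cur, prev) d).1)
      ((pvStepA thr (lines, cur, prev) d).2.1) ((pvStepA thr (lines, cur, prev) d).2.2)
    simp only [List.foldl_cons] at this ⊢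
    rw [this]
    simp only [pvStepA, goLines]
    by_cases h : |d.2.1 - prev| > thr <;>
      by_cases h2 : |d2.2.1 - d.2.1| > thr <;>
      simp [h, h2]

-- A's forward fold computes goLines.
lemma pvA_eq_go (thr : Int) (d : PvDet) (rest : List PvDet) :
    group_by_lines (d :: rest) thr
    = (goLines thr (d :: rest) d.2.1).1 :: (goLines thr (d :: rest) d.2.1).2 := by
  have := pvAfold thr rest d [] [] d.2.1
  simpa [group_by_lines, PySem.List.pyGet?, PySem.List.pyIdx?] using this

lemma pvZipCons (d : PvDet) (rest : List PvDet) (prev : Int) :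
    ((d :: rest).zip (prev :: (d :: rest).dropLast.map (fun d => d.2.1)))
    = (d, prev) :: (rest.zip (d.2.1 :: rest.dropLast.map (fun d => d.2.1))) := by
  cases rest <;> simp [List.zip]

-- B's reversed fold computes goLines (groups and the open group held reversed).
lemma pvBfold (thr : Int) (items : List PvDet) :
    ∀ (prev : Int),
    List.foldl (pvStepB thr) ([], [])
      ((items.zip (prev :: items.dropLast.map (fun d => d.2.1))).reverse)
    = ((goLines thr items prev).2.reverse, (goLines thr items prev).1.reverse) := by
  induction items with
  | nil => intro prev; simp [goLines]
  | cons d rest ih =>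
    intro prev
    rw [pvZipCons, List.reverse_cons, List.foldl_append, ih d.2.1]
    simp only [List.foldl, goLines, pvStepB]
    by_cases h : |d.2.1 - prev| > thr <;> simp [h]

lemma pvB_eq_go (thr : Int) (d : PvDet) (rest : List PvDet) :
    group_by_lines_alt (d :: rest) thr
    = (goLines thr (d :: rest) d.2.1).1 :: (goLines thr (d :: rest) d.2.1).2 := by
  simp only [group_by_lines_alt]
  rw [pvBfold thr (d :: rest) d.2.1]
  simp

-- ===== VERDICT (by name: the statement is the Claim_ definition above) =====
theorem group_by_lines_spec : Claim_equal_group_by_lines := by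
  intro detections y_threshold _ hpre
  unfold Spec_group_by_lines
  cases detections with
  | nil => exact absurd rfl hpre
  | cons d rest => rw [pvA_eq_go, pvB_eq_go]
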